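-- pv_equiv track=rewrite | github.com/casangi/xradio | src/xradio/image/_util/_casacore/xds_from_casacore.py | _get_chunk_list
-- ===== SOURCE A (Python) =====
-- from typing import List, Tuple, Union
--
-- def _get_chunk_list(
--     chunks: dict, coords: list, image_shape: Union[list, tuple]
-- ) -> tuple:
--     ret_list = list(image_shape)
--     axis = 0
--     for c in coords:
--         if c == "direction" or c == "linear":
--             lm = ("l", "m")
--             uv = ("u", "v")
--             for i in (0, 1):
--                 for k in (lm[i], uv[i]):
--                     if k in chunks:
--                         ret_list[axis] = chunks[k]
--                         break
--                 # add an axis because direction has 2 axes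
--                 if i == 0:
--                     axis += 1
--         elif c == "spectral":
--             if "frequency" in chunks:
--                 ret_list[axis] = chunks["frequency"]
--         elif c == "stokes":
--             if "polarization" in chunks:
--                 ret_list[axis] = chunks["polarization"]
--         else:
--             raise Exception(f"Unhandled coordinate type {c}")
--         axis += 1
--     return tuple(ret_list)
-- ===== SOURCE B (Python) =====
-- _AXIS_KEYS = {
--     "direction": [("l", "u"), ("m", "v")],
--     "linear": [("l", "u"), ("m", "v")],
--     "spectral": [("frequency",)],
--     "stokes": [("polarization",)],
-- }
--
--
-- def _get_chunk_list(chunks, coords, image_shape):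
--     key_groups = []
--     for c in coords:
--         if c not in _AXIS_KEYS:
--             raise Exception(f"Unhandled coordinate type {c}")
--         key_groups.extend(_AXIS_KEYS[c])
--     key_groups += [()] * (len(image_shape) - len(key_groups))
--     return tuple(
--         next((chunks[k] for k in ks if k in chunks), size)
--         for ks, size in zip(key_groups, image_shape)
--     )
-- ===== Notes on version B (the rewrite author's own statement) =====
-- stated objective: simpler
-- what changed: Replaces A's four-way branching loop with per-type inner key loops and a manually threaded axis counter by a data-driven version: a dispatch table maps each coordinate type to its per-axis candidate-key groups, which are flattened over coords, padded, zipped with image_shape and mapped with a first-present-key pick.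
import Mathlib
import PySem

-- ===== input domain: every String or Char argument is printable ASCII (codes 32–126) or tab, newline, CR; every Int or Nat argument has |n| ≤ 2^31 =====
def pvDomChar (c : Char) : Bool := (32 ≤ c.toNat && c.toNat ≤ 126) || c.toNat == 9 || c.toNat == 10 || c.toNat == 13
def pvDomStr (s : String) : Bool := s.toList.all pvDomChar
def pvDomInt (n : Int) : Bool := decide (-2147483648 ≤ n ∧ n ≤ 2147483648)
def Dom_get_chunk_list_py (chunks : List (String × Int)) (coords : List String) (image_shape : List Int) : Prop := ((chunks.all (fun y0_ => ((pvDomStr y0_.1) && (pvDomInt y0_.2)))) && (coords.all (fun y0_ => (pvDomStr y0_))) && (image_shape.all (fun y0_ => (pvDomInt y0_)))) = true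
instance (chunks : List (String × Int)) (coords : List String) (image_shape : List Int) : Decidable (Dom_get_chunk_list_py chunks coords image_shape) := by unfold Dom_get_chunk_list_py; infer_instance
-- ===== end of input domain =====

-- B replaces A's per-coordinate-type branching loop by one table-driven pass: a dispatch table of
-- per-axis candidate-key groups flattened over coords, padded, zipped with image_shape and mapped
-- (objective: simpler). Equivalence is about the return value; neither version mutates its arguments.

-- ===== PORT A =====
-- 'k in chunks' / 'chunks[k]' on the association list (first match, as per the dict convention)
def pvLookup (chunks : List (String × Int)) (k : String) : Option Int := chunks.lookup k

-- one iteration of A's 'for c in coords' loop, state = (ret_list, axis); the inner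
-- 'for k in (lm[i], uv[i]) … break' is the nested match (first present key wins).
-- On an unhandled coordinate type Python raises (excluded by Pre_); the port leaves ret_list as is.
def pvAStep (chunks : List (String × Int)) (st : List Int × Nat) (c : String) : List Int × Nat :=
  let ret := st.1
  let axis := st.2
  if c = "direction" ∨ c = "linear" then
    let ret1 := match pvLookup chunks "l" with
      | some v => ret.set axis v
      | none => match pvLookup chunks "u" with
        | some v => ret.set axis v
        | none => ret
    let axis1 := axis + 1
    let ret2 := match pvLookup chunks "m" with
      | some v => ret1.set axis1 v
      | none => match pvLookup chunks "v" with
        | some v => ret1.set axis1 v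
        | none => ret1
    (ret2, axis1 + 1)
  else if c = "spectral" then
    (match pvLookup chunks "frequency" with
      | some v => ret.set axis v
      | none => ret, axis + 1)
  else if c = "stokes" then
    (match pvLookup chunks "polarization" with
      | some v => ret.set axis v
      | none => ret, axis + 1)
  else
    (ret, axis + 1)  -- raise Exception(...): unreachable under Pre_

def get_chunk_list_py (chunks : List (String × Int)) (coords : List String) (image_shape : List Int) : List Int :=
  (coords.foldl (pvAStep chunks) (image_shape, 0)).1

-- ===== PORT B =====
-- the dispatch table _AXIS_KEYS (none = key absent = Python raise, unreachable under Pre_)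
def pvAxisKeys (c : String) : Option (List (List String)) :=
  if c = "direction" ∨ c = "linear" then some [["l", "u"], ["m", "v"]]
  else if c = "spectral" then some [["frequency"]]
  else if c = "stokes" then some [["polarization"]]
  else none

-- next((chunks[k] for k in ks if k in chunks), size)
def pvPick (chunks : List (String × Int)) (p : List String × Int) : Int :=
  match p.1.find? (fun k => (pvLookup chunks k).isSome) with
  | some k => (pvLookup chunks k).getD 0
  | none => p.2

def get_chunk_list_py_alt (chunks : List (String × Int)) (coords : List String) (image_shape : List Int) : List Int :=
  let key_groups := coords.foldl (fun acc c =>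
    match pvAxisKeys c with
    | some gs => acc ++ gs
    | none => acc) []   -- Python raises here; unreachable under Pre_
  let padded := key_groups ++ List.replicate (image_shape.length - key_groups.length) []
  (padded.zip image_shape).map (pvPick chunks)

-- ===== PRECONDITION & SPEC =====
-- per-axis candidate-key groups of one coordinate type (the dispatch table as a function)
def pvGroupsOf (c : String) : List (List String) := (pvAxisKeys c).getD []

-- Pre_ = exactly the inputs on which A returns: it excludes (a) coords containing an unhandled
-- coordinate type, where A raises Exception, and (b) inputs where a chunk key matches an axis
-- beyond the end of image_shape, where A raises IndexError on the assignment.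
def Pre_get_chunk_list_py (chunks : List (String × Int)) (coords : List String) (image_shape : List Int) : Prop :=
  (∀ c ∈ coords, c = "direction" ∨ c = "linear" ∨ c = "spectral" ∨ c = "stokes") ∧
  (∀ ks ∈ (coords.flatMap pvGroupsOf).drop image_shape.length, ∀ k ∈ ks, chunks.lookup k = none)

instance (chunks : List (String × Int)) (coords : List String) (image_shape : List Int) : Decidable (Pre_get_chunk_list_py chunks coords image_shape) := by unfold Pre_get_chunk_list_py; infer_instance

def pvWitness_get_chunk_list_py : (List (String × Int)) × List String × List Int :=
  ([("frequency", 5), ("m", 3)], ["direction", "spectral"], [10, 11, 12])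

def Spec_get_chunk_list_py (chunks : List (String × Int)) (coords : List String) (image_shape : List Int) (out : List Int) : Prop := out = get_chunk_list_py_alt chunks coords image_shape
instance (chunks : List (String × Int)) (coords : List String) (image_shape : List Int) (out : List Int) : Decidable (Spec_get_chunk_list_py chunks coords image_shape out) := by unfold Spec_get_chunk_list_py; infer_instance

-- ===== CLAIM (what is proved, stated in full; the proofs are below) =====
def Claim_equal_get_chunk_list_py : Prop := ∀ (chunks : List (String × Int)) (coords : List String) (image_shape : List Int), Dom_get_chunk_list_py chunks coords image_shape → Pre_get_chunk_list_py chunks coords image_shape → Spec_get_chunk_list_py chunks coords image_shape (get_chunk_list_py chunks coords image_shape)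

-- ===== LEMMAS AND PROOFS =====

-- sequential application of groups at increasing axes (the shape A's loop computes)
def pvApplyAll (chunks : List (String × Int)) : List (List String) → List Int → Nat → List Int
  | [], ret, _ => ret
  | ks :: gs, ret, axis =>
    pvApplyAll chunks gs
      (match ks.find? (fun k => (pvLookup chunks k).isSome) with
        | some k => ret.set axis ((pvLookup chunks k).getD 0)
        | none => ret) (axis + 1)

lemma pvApplyAll_append (chunks : List (String × Int)) (gs1 gs2 : List (List String)) :
    ∀ ret axis, pvApplyAll chunks (gs1 ++ gs2) ret axis
      = pvApplyAll chunks gs2 (pvApplyAll chunks gs1 ret axis) (axis + gs1.length) := by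
  induction gs1 with
  | nil => intro ret axis; simp [pvApplyAll]
  | cons ks gs ih =>
    intro ret axis
    simp only [List.cons_append, pvApplyAll, ih, List.length_cons]
    ring_nf

-- one valid step of A is applying that coordinate's groups
lemma pvAStep_valid (chunks : List (String × Int)) (ret : List Int) (axis : Nat) (c : String)
    (hc : c = "direction" ∨ c = "linear" ∨ c = "spectral" ∨ c = "stokes") :
    pvAStep chunks (ret, axis) c = (pvApplyAll chunks (pvGroupsOf c) ret axis, axis + (pvGroupsOf c).length) := by
  rcases hc with h | h | h | h <;> subst h <;>
    cases hl : pvLookup chunks "l" <;> cases hu : pvLookup chunks "u" <;>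
    cases hm : pvLookup chunks "m" <;> cases hv : pvLookup chunks "v" <;>
    cases hf : pvLookup chunks "frequency" <;> cases hp : pvLookup chunks "polarization" <;>
    simp [pvAStep, pvGroupsOf, pvAxisKeys, pvApplyAll, List.find?, hl, hu, hm, hv, hf, hp]

-- A's whole loop is pvApplyAll over the flattened groups
lemma pvA_loop_eq (chunks : List (String × Int)) (coords : List String)
    (h : ∀ c ∈ coords, c = "direction" ∨ c = "linear" ∨ c = "spectral" ∨ c = "stokes") :
    ∀ ret axis, coords.foldl (pvAStep chunks) (ret, axis)
      = (pvApplyAll chunks (coords.flatMap pvGroupsOf) ret axis,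
         axis + (coords.flatMap pvGroupsOf).length) := by
  induction coords with
  | nil => intro ret axis; simp [pvApplyAll]
  | cons c cs ih =>
    intro ret axis
    have hc := h c (List.mem_cons_self ..)
    have hcs : ∀ x ∈ cs, x = "direction" ∨ x = "linear" ∨ x = "spectral" ∨ x = "stokes" :=
      fun x hx => h x (List.mem_cons_of_mem _ hx)
    simp only [List.foldl_cons, pvAStep_valid chunks ret axis c hc, ih hcs,
      List.flatMap_cons, pvApplyAll_append, List.length_append]
    rw [Nat.add_assoc]

-- B's side with no groups left: zipping the padding with the tail returns the tail
lemma pv_pad_zip_nil (chunks : List (String × Int)) (ret : List Int) :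
    ((List.replicate ret.length ([] : List String)).zip ret).map (pvPick chunks) = ret := by
  induction ret with
  | nil => rfl
  | cons r rs ih => simp [List.replicate, pvPick, List.find?, ih]

-- groups whose candidate keys are all absent leave the list unchanged
lemma pvApplyAll_absent (chunks : List (String × Int)) :
    ∀ (gs : List (List String)) (ret : List Int) (axis : Nat),
      (∀ ks ∈ gs, ∀ k ∈ ks, chunks.lookup k = none) →
      pvApplyAll chunks gs ret axis = ret := by
  intro gs
  induction gs with
  | nil => intro ret axis _; rfl
  | cons ks gs ih =>
    intro ret axis h
    have hfind : ks.find? (fun k => (pvLookup chunks k).isSome) = none := by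
      rw [List.find?_eq_none]
      intro k hk
      simp [pvLookup, h ks (List.mem_cons_self ..) k hk]
    simp only [pvApplyAll, hfind]
    exact ih ret (axis + 1) (fun ks' hks' => h ks' (List.mem_cons_of_mem _ hks'))

-- the key invariant: sequential set-based application equals the zip/map form,
-- provided groups past the end of the list have no present candidate key
lemma pvApplyAll_eq_zip (chunks : List (String × Int)) :
    ∀ (gs : List (List String)) (pre ret : List Int),
      (∀ ks ∈ gs.drop ret.length, ∀ k ∈ ks, chunks.lookup k = none) →
      pvApplyAll chunks gs (pre ++ ret) pre.length
        = pre ++ ((gs ++ List.replicate (ret.length - gs.length) []).zip ret).map (pvPick chunks) := by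
  intro gs
  induction gs with
  | nil =>
    intro pre ret _
    simp [pvApplyAll, pv_pad_zip_nil]
  | cons ks gs ih =>
    intro pre ret habsent
    cases ret with
    | nil =>
      simp only [List.append_nil] at habsent ⊢
      rw [pvApplyAll_absent chunks (ks :: gs) pre pre.length habsent]
      simp
    | cons r rs =>
      have hlen' : ∀ ks' ∈ gs.drop rs.length, ∀ k ∈ ks', chunks.lookup k = none := by
        simpa using habsent
      simp only [pvApplyAll]
      have hstep :
          (match ks.find? (fun k => (pvLookup chunks k).isSome) with
            | some k => (pre ++ r :: rs).set pre.length ((pvLookup chunks k).getD 0)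
            | none => pre ++ r :: rs)
          = (pre ++ [pvPick chunks (ks, r)]) ++ rs := by
        cases hf : ks.find? (fun k => (pvLookup chunks k).isSome)
        · simp [pvPick, hf]
        · simp [pvPick, hf]
      rw [hstep]
      have hax : pre.length + 1 = (pre ++ [pvPick chunks (ks, r)]).length := by simp
      rw [hax, ih (pre ++ [pvPick chunks (ks, r)]) rs hlen']
      simp [pvPick]

-- B's foldl-built key_groups are the flattened groups
lemma pvB_groups_eq (coords : List String) :
    ∀ acc : List (List String),
      coords.foldl (fun acc c =>
        match pvAxisKeys c with
        | some gs => acc ++ gs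
        | none => acc) acc
      = acc ++ coords.flatMap (fun c => (pvAxisKeys c).getD []) := by
  induction coords with
  | nil => intro acc; simp
  | cons c cs ih =>
    intro acc
    simp only [List.foldl_cons, List.flatMap_cons, ih]
    cases h : pvAxisKeys c <;> simp

-- ===== VERDICT (by name: the statement is the Claim_ definition above) =====
theorem get_chunk_list_py_spec : Claim_equal_get_chunk_list_py := by
  intro chunks coords image_shape _ hpre
  obtain ⟨hvalid, habsent⟩ := hpre
  show get_chunk_list_py chunks coords image_shape = get_chunk_list_py_alt chunks coords image_shape
  unfold get_chunk_list_py get_chunk_list_py_alt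
  rw [pvA_loop_eq chunks coords hvalid image_shape 0]
  rw [pvB_groups_eq coords []]
  simp only [List.nil_append]
  have hg : coords.flatMap (fun c => (pvAxisKeys c).getD []) = coords.flatMap pvGroupsOf := rfl
  rw [hg]
  have := pvApplyAll_eq_zip chunks (coords.flatMap pvGroupsOf) [] image_shape habsent
  simpa using this
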